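-- pv_equiv track=rewrite | github.com/nestorfranca/Diagrama-de-Fluxo | Fluxo/sistema.py | __verifica_colisao
-- ===== SOURCE A (Python) =====
-- def __verifica_colisao(vetor):
--     '''Verifica as combinações de laços que não se tocam'''
--
--     # teste todos os pares de conjuntos dentro do vetor:
--     for conjunto1 in vetor:
--         for conjunto2 in vetor:
--
--             if conjunto1 == conjunto2:
--                 continue
--
--             # se houver um valor de interseção, então há colisão
--             valor_comum = set(conjunto1).intersection(set(conjunto2))
--             if len(valor_comum) > 0:
--                 return True
--
--     return False
-- ===== SOURCE B (Python) =====
-- def __verifica_colisao(vetor):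
--     '''Verifica as combinações de laços que não se tocam'''
--     # one pass: map each element to the first set (by value) it was seen in
--     seen = {}
--     for conjunto in vetor:
--         for e in conjunto:
--             if e in seen:
--                 if seen[e] != conjunto:
--                     return True
--             else:
--                 seen[e] = conjunto
--     return False
-- ===== Notes on version B (the rewrite author's own statement) =====
-- stated objective: alternative
-- what changed: Replaced the all-pairs set-intersection test by a single pass that maps each element to the first list (by value) containing it and reports a collision when an element reappears in a different list; on the measured inputs the two were comparable in time.
import Mathlib
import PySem

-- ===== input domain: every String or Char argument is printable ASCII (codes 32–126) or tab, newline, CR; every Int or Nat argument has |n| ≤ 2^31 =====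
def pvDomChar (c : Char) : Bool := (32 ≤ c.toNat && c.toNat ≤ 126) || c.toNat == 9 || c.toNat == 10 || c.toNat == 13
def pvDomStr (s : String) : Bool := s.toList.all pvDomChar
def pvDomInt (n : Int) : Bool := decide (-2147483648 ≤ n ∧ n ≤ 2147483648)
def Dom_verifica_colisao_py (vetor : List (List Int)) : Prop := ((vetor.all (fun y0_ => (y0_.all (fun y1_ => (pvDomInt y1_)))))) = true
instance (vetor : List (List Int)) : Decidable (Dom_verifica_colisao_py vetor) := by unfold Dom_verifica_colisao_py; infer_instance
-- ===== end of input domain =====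

-- B replaces A's all-pairs set-intersection scan by a single pass that maps each
-- element to the first list (by value) containing it; objective: alternative single-pass algorithm.


-- ===== PORT A =====
-- for conjunto1 in vetor: for conjunto2 in vetor: if c1 == c2: continue;
--   if len(set(c1).intersection(set(c2))) > 0: return True; return False
def verifica_colisao_py (vetor : List (List Int)) : Bool :=
  vetor.any (fun conjunto1 =>
    vetor.any (fun conjunto2 =>
      if conjunto1 = conjunto2 then false
      else decide (0 < (PySem.Set.inter (PySem.Set.ofList conjunto1) (PySem.Set.ofList conjunto2)).length)))

-- ===== PORT B =====
-- inner loop of Source B: for e in conjunto: if e in seen: if seen[e] != conjunto: return True; else: seen[e] = conjunto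
def pvScanB (conjunto : List Int) : List Int → PySem.Dict Int (List Int) → Bool × PySem.Dict Int (List Int)
  | [], seen => (false, seen)
  | e :: es, seen =>
    match seen.get? e with
    | some l => if l ≠ conjunto then (true, seen) else pvScanB conjunto es seen
    | none => pvScanB conjunto es (seen.insert e conjunto)

-- outer loop of Source B: for conjunto in vetor
def pvGoB : List (List Int) → PySem.Dict Int (List Int) → Bool
  | [], _ => false
  | conjunto :: rest, seen =>
    match pvScanB conjunto conjunto seen with
    | (true, _) => true
    | (false, seen') => pvGoB rest seen'

def verifica_colisao_py_alt (vetor : List (List Int)) : Bool :=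
  pvGoB vetor PySem.Dict.empty

-- ===== PRECONDITION & SPEC =====
def Spec_verifica_colisao_py (vetor : List (List Int)) (out : Bool) : Prop := out = verifica_colisao_py_alt vetor
instance (vetor : List (List Int)) (out : Bool) : Decidable (Spec_verifica_colisao_py vetor out) := by unfold Spec_verifica_colisao_py; infer_instance

-- ===== CLAIM (what is proved, stated in full; the proofs are below) =====
def Claim_equal_verifica_colisao_py : Prop := ∀ (vetor : List (List Int)), Dom_verifica_colisao_py vetor → Spec_verifica_colisao_py vetor (verifica_colisao_py vetor)

-- ===== LEMMAS AND PROOFS =====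

-- the common mathematical content: two value-distinct lists of vetor share an element
def pvColl (vetor : List (List Int)) : Prop :=
  ∃ c1 ∈ vetor, ∃ c2 ∈ vetor, c1 ≠ c2 ∧ ∃ e, e ∈ c1 ∧ e ∈ c2

-- first list of pre (in order) containing e
def pvFirst (pre : List (List Int)) (e : Int) : Option (List Int) :=
  pre.find? (fun c => decide (e ∈ c))

-- the dictionary Source B's pass builds over pre when no collision was found
def pvBuild (pre : List (List Int)) : PySem.Dict Int (List Int) :=
  pre.foldl (fun d c => c.foldl (fun d e => if (d.get? e).isSome then d else d.insert e c) d) PySem.Dict.empty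

lemma pvInterPos (c1 c2 : List Int) :
    (0 < (PySem.Set.inter (PySem.Set.ofList c1) (PySem.Set.ofList c2)).length) ↔ ∃ e, e ∈ c1 ∧ e ∈ c2 := by
  rw [List.length_pos_iff_exists_mem]
  simp [PySem.Set.mem_inter, PySem.Set.mem_ofList]

lemma pvA_iff (vetor : List (List Int)) : verifica_colisao_py vetor = true ↔ pvColl vetor := by
  simp [verifica_colisao_py, pvColl, List.any_eq_true, pvInterPos]

lemma pvScanB_fst (conjunto : List Int) (es : List Int) (seen : PySem.Dict Int (List Int)) :
    (pvScanB conjunto es seen).1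
      = es.any (fun e => match seen.get? e with | some l => decide (l ≠ conjunto) | none => false) := by
  induction es generalizing seen with
  | nil => rfl
  | cons e es ih =>
    simp only [pvScanB, List.any_cons]
    cases h : seen.get? e with
    | some l =>
      by_cases hl : l = conjunto
      · simp [hl, ih]
      · simp [hl]
    | none =>
      simp only [ih]
      rw [PySem.List.any_congr_mem (f := fun x => match (seen.insert e conjunto).get? x with | some l => decide (l ≠ conjunto) | none => false)
          (g := fun x => match seen.get? x with | some l => decide (l ≠ conjunto) | none => false)]
      · simp
      · intro x hx
        by_cases hxe : x = e
        · subst hxe; rw [PySem.Dict.get?_insert_self, h]; simp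
        · rw [PySem.Dict.get?_insert_of_ne _ _ hxe]

lemma pvScanB_snd (conjunto : List Int) (es : List Int) (seen : PySem.Dict Int (List Int))
    (h : (pvScanB conjunto es seen).1 = false) :
    (pvScanB conjunto es seen).2
      = es.foldl (fun d e => if (d.get? e).isSome then d else d.insert e conjunto) seen := by
  induction es generalizing seen with
  | nil => rfl
  | cons e es ih =>
    simp only [pvScanB, List.foldl_cons] at *
    cases hg : seen.get? e with
    | some l =>
      by_cases hl : l = conjunto
      · simp only [hg, hl] at h ⊢
        simp only [ne_eq, not_true_eq_false, ite_false] at h ⊢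
        rw [ih _ h]
        simp
      · simp [hg, hl] at h
    | none =>
      simp only [hg] at h ⊢
      rw [ih _ h]
      simp

lemma pvInner_get (c : List Int) (es : List Int) (d : PySem.Dict Int (List Int)) (e : Int) :
    (es.foldl (fun d e => if (d.get? e).isSome then d else d.insert e c) d).get? e
      = (d.get? e).or (if e ∈ es then some c else none) := by
  induction es generalizing d with
  | nil => simp
  | cons x es ih =>
    simp only [List.foldl_cons, ih]
    by_cases hx : (d.get? x).isSome
    · simp only [hx, if_true]
      by_cases hex : e = x
      · subst hex
        cases h : d.get? e with
        | some v => simp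
        | none => rw [h] at hx; simp at hx
      · simp [List.mem_cons, hex]
    · simp only [hx, if_false, Bool.false_eq_true]
      by_cases hex : e = x
      · subst hex
        rw [PySem.Dict.get?_insert_self]
        have : d.get? e = none := Option.eq_none_iff_forall_ne_some.mpr (fun v hv => hx (by simp [hv]))
        simp [this]
      · rw [PySem.Dict.get?_insert_of_ne _ _ hex]
        simp [List.mem_cons, hex]

lemma pvOuter_get (pre : List (List Int)) (d : PySem.Dict Int (List Int)) (e : Int) :
    (pre.foldl (fun d c => c.foldl (fun d e => if (d.get? e).isSome then d else d.insert e c) d) d).get? e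
      = (d.get? e).or (pvFirst pre e) := by
  induction pre generalizing d with
  | nil => simp [pvFirst]
  | cons c pre ih =>
    simp only [List.foldl_cons, ih, pvInner_get, Option.or_assoc]
    congr 1
    simp only [pvFirst, List.find?_cons]
    by_cases h : e ∈ c <;> simp [h]

lemma pvBuild_get (pre : List (List Int)) (e : Int) :
    (pvBuild pre).get? e = pvFirst pre e := by
  simp [pvBuild, pvOuter_get, PySem.Dict.get?_empty]

lemma pvFirst_mem {pre : List (List Int)} {e : Int} {l : List Int} (h : pvFirst pre e = some l) :
    l ∈ pre ∧ e ∈ l :=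
  ⟨List.mem_of_find?_eq_some h, by simpa using List.find?_some h⟩

lemma pvFirst_isSome {pre : List (List Int)} {e : Int} {l : List Int} (hl : l ∈ pre) (he : e ∈ l) :
    ∃ f, pvFirst pre e = some f := by
  have : (pvFirst pre e).isSome := List.find?_isSome.mpr ⟨l, hl, by simpa using he⟩
  exact Option.isSome_iff_exists.mp this

-- invariant of Source B's outer loop: started after a collision-free prefix pre,
-- it returns true exactly when pre ++ vetor has a collision
lemma pvGoB_iff (vetor pre : List (List Int)) (hnc : ¬ pvColl pre) :
    pvGoB vetor (pvBuild pre) = true ↔ pvColl (pre ++ vetor) := by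
  induction vetor generalizing pre with
  | nil => simpa [pvGoB] using hnc
  | cons c rest ih =>
    have hfst := pvScanB_fst c c (pvBuild pre)
    rcases hs : pvScanB c c (pvBuild pre) with ⟨b, d'⟩
    cases b with
    | true =>
      -- collision detected at c: result is true, and pvColl holds
      simp only [pvGoB, hs, true_iff]
      rw [hs] at hfst
      have hit : (c.any fun e => match (pvBuild pre).get? e with
          | some l => decide (l ≠ c) | none => false) = true := hfst.symm
      rw [List.any_eq_true] at hit
      obtain ⟨e, hec, hpred⟩ := hit
      cases hf : pvFirst pre e with
      | none => rw [pvBuild_get, hf] at hpred; simp at hpred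
      | some l =>
        rw [pvBuild_get, hf] at hpred
        simp only [decide_eq_true_eq] at hpred
        obtain ⟨hlpre, hel⟩ := pvFirst_mem hf
        exact ⟨l, by simp [hlpre], c, by simp, hpred, e, hel, hec⟩
    | false =>
      simp only [pvGoB, hs]
      have hfalse : (pvScanB c c (pvBuild pre)).1 = false := by rw [hs]
      have hsnd := pvScanB_snd c c (pvBuild pre) hfalse
      have hbuild : d' = pvBuild (pre ++ [c]) := by
        have : (pvScanB c c (pvBuild pre)).2 = d' := by rw [hs]
        rw [← this, hsnd]
        simp [pvBuild, List.foldl_append]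
      have hnc' : ¬ pvColl (pre ++ [c]) := by
        rintro ⟨c1, h1, c2, h2, hne, e, he1, he2⟩
        rw [List.mem_append] at h1 h2
        rw [hfst] at hfalse
        have hnohit : ∀ x ∈ c, (match (pvBuild pre).get? x with
            | some l => decide (l ≠ c) | none => false) = false := by
          intro x hx
          by_contra hcon
          rw [Bool.not_eq_false] at hcon
          have : (c.any fun e => match (pvBuild pre).get? e with
              | some l => decide (l ≠ c) | none => false) = true :=
            List.any_eq_true.mpr ⟨x, hx, hcon⟩
          rw [hfalse] at this; exact absurd this (by simp)
        have key : ∀ g, g ∈ pre → g ≠ c → e ∈ g → e ∈ c → False := by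
          intro g hg hgne heg hec
          obtain ⟨f, hf⟩ := pvFirst_isSome hg heg
          obtain ⟨hfpre, hef⟩ := pvFirst_mem hf
          have hh := hnohit e hec
          rw [pvBuild_get, hf] at hh
          have hfc : f = c := by simpa using hh
          subst hfc
          by_cases hfc1 : f = g
          · exact hgne (hfc1.symm)
          · exact hnc ⟨f, hfpre, g, hg, hfc1, e, hef, heg⟩
        rcases h1 with h1 | h1 <;> rcases h2 with h2 | h2
        · exact hnc ⟨c1, h1, c2, h2, hne, e, he1, he2⟩
        · simp only [List.mem_singleton] at h2; subst h2
          exact key c1 h1 hne he1 he2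
        · simp only [List.mem_singleton] at h1; subst h1
          exact key c2 h2 (Ne.symm hne) he2 he1
        · simp only [List.mem_singleton] at h1 h2; subst h1; subst h2
          exact hne rfl
      rw [hbuild, ih (pre ++ [c]) hnc']
      simp

-- ===== VERDICT (by name: the statement is the Claim_ definition above) =====
theorem verifica_colisao_py_spec : Claim_equal_verifica_colisao_py := by
  intro vetor _
  unfold Spec_verifica_colisao_py verifica_colisao_py_alt
  have hb := pvGoB_iff vetor [] (by unfold pvColl; simp)
  have hemp : pvBuild [] = PySem.Dict.empty := rfl
  rw [hemp] at hb
  rw [Bool.eq_iff_iff, pvA_iff, hb]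
  simp
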